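-- pv_equiv track=rewrite | github.com/ganeshparsads/OAs | OAs/password.py | check
-- ===== SOURCE A (Python) =====
-- def check(new, old):
--     i, j = 0, 0
--     while i < len(new) and j < len(old):
--         if ord(new[i]) + 1 == 123:
--             new_ele = 97
--         else:
--             new_ele = ord(new[i]) + 1
--         if ord(old[j]) == ord(new[i]) or ord(old[j]) == new_ele:
--             i += 1
--             j += 1
--         else:
--             i += 1
--     return j == len(old)
-- ===== SOURCE B (Python) =====
-- def check(new, old):
--     m = len(old)
--     # dp[j]: can old[j:] be matched within the current suffix of new (initially the empty suffix)?
--     dp = [False] * m + [True]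
--     for ch in reversed(new):
--         c = ord(ch)
--         shifted = 97 if c + 1 == 123 else c + 1
--         ndp = dp[:]
--         for j in range(m):
--             oc = ord(old[j])
--             if (oc == c or oc == shifted) and dp[j + 1]:
--                 ndp[j] = True
--         dp = ndp
--     return dp[0]
-- ===== Notes on version B (the rewrite author's own statement) =====
-- stated objective: alternative
-- what changed: Replaced the greedy two-pointer scan with a bottom-up dynamic-programming boolean table over suffixes (dp[j] = old[j:] matchable in the remaining suffix of new), proved equal to the greedy via a subsequence-monotonicity lemma.
import Mathlib
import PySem

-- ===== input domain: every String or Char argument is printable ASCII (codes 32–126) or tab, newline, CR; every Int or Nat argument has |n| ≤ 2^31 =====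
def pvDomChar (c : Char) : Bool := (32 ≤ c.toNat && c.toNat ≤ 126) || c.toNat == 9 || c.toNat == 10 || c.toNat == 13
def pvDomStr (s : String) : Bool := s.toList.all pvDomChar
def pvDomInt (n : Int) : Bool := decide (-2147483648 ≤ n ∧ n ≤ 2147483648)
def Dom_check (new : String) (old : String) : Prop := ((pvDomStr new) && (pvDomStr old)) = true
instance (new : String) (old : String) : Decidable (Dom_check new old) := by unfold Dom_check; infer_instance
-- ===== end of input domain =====

-- B replaces A's greedy two-pointer scan with a bottom-up DP table over suffixes of old (alternative algorithm, not faster).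

-- ===== PORT A =====
-- A's while loop with indices i, j: structural recursion on the remaining suffixes
-- new[i:], old[j:]; the final `return j == len(old)` is the `old`-suffix-empty test.
def checkLoopA : List Char → List Char → Bool
  | _, [] => true
  | [], _ :: _ => false
  | n :: ns, o :: os =>
    let new_ele : Nat := if n.toNat + 1 == 123 then 97 else n.toNat + 1
    if o.toNat == n.toNat || o.toNat == new_ele then
      checkLoopA ns os
    else
      checkLoopA ns (o :: os)

def check (new : String) (old : String) : Bool :=
  checkLoopA new.toList old.toList

-- ===== PORT B =====
-- inner `for j in range(m)` pass of Source B: walk old and the previous dp row together,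
-- setting entry j to True where (old[j] matches c, possibly shifted) and dp[j+1] holds.
def stepRow (c : Char) : List Char → List Bool → List Bool
  | [], dp => dp
  | _ :: _, [] => []
  | o :: os, d :: dp =>
    let shifted : Nat := if c.toNat + 1 == 123 then 97 else c.toNat + 1
    (d || ((o.toNat == c.toNat || o.toNat == shifted) && dp.headD false)) :: stepRow c os dp

-- outer `for ch in reversed(new)` loop = foldr over new's characters; dp starts as
-- [False]*m + [True]; the answer is dp[0].
def check_alt (new : String) (old : String) : Bool :=
  let oldL := old.toList
  let init := List.replicate oldL.length false ++ [true]
  (new.toList.foldr (fun ch dp => stepRow ch oldL dp) init).headD false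

-- ===== PRECONDITION & SPEC =====
def Spec_check (new : String) (old : String) (out : Bool) : Prop := out = check_alt new old
instance (new : String) (old : String) (out : Bool) : Decidable (Spec_check new old out) := by unfold Spec_check; infer_instance

-- ===== CLAIM (what is proved, stated in full; the proofs are below) =====
def Claim_equal_check : Prop := ∀ (new : String) (old : String), Dom_check new old → Spec_check new old (check new old)

-- ===== LEMMAS AND PROOFS =====

-- the match predicate both programs use
def pred (c o : Char) : Bool :=
  o.toNat == c.toNat || o.toNat == (if c.toNat + 1 == 123 then 97 else c.toNat + 1)

-- the branching subsequence recursion the DP table implements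
def sub : List Char → List Char → Bool
  | _, [] => true
  | [], _ :: _ => false
  | c :: ns, o :: os => (pred c o && sub ns os) || sub ns (o :: os)

theorem sub_cons_weaken (c : Char) (ns os : List Char) (h : sub ns os = true) :
    sub (c :: ns) os = true := by
  cases os with
  | nil => rfl
  | cons o os => simp [sub]; tauto

theorem sub_mono (ns : List Char) : ∀ (o : Char) (os : List Char),
    sub ns (o :: os) = true → sub ns os = true := by
  induction ns with
  | nil => intro o os h; simp [sub] at h
  | cons c ns ih =>
    intro o os h
    simp only [sub, Bool.or_eq_true, Bool.and_eq_true] at h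
    rcases h with ⟨_, h2⟩ | h2
    · exact sub_cons_weaken c ns os h2
    · exact sub_cons_weaken c ns os (ih o os h2)

theorem greedy_eq_sub (ns : List Char) : ∀ os : List Char,
    checkLoopA ns os = sub ns os := by
  induction ns with
  | nil => intro os; cases os <;> rfl
  | cons c ns ih =>
    intro os
    cases os with
    | nil => rfl
    | cons o os =>
      have e : checkLoopA (c :: ns) (o :: os)
          = if pred c o then checkLoopA ns os else checkLoopA ns (o :: os) := rfl
      rw [e]
      cases hp : pred c o with
      | false => simp [ih, sub, hp]
      | true =>
        simp only [if_true, ih, sub, hp, Bool.true_and]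
        cases hos : sub ns os with
        | true => simp
        | false =>
          cases hoos : sub ns (o :: os) with
          | true => exact absurd (sub_mono ns o os hoos) (by simp [hos])
          | false => simp

-- the row of sub-values for all suffixes of old
def mkRow (ns : List Char) : List Char → List Bool
  | [] => [true]
  | o :: os => sub ns (o :: os) :: mkRow ns os

theorem sub_nil (ns : List Char) : sub ns [] = true := by cases ns <;> rfl

theorem head_mkRow (ns : List Char) : ∀ os : List Char,
    (mkRow ns os).headD false = sub ns os := by
  intro os; cases os with
  | nil => simp [mkRow, sub_nil]
  | cons o os => rfl

theorem mkRow_nil : ∀ os : List Char,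
    mkRow [] os = List.replicate os.length false ++ [true] := by
  intro os
  induction os with
  | nil => rfl
  | cons o os ih => simp [mkRow, sub, ih, List.replicate]

theorem step_mkRow (c : Char) (ns : List Char) : ∀ os : List Char,
    stepRow c os (mkRow ns os) = mkRow (c :: ns) os := by
  intro os
  induction os with
  | nil => rfl
  | cons o os ih =>
    simp only [mkRow, stepRow, ih, head_mkRow, sub, pred]
    congr 1
    exact Bool.or_comm _ _

theorem fold_mkRow (oldL : List Char) : ∀ ns : List Char,
    ns.foldr (fun ch dp => stepRow ch oldL dp) (List.replicate oldL.length false ++ [true])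
      = mkRow ns oldL := by
  intro ns
  induction ns with
  | nil => simp [mkRow_nil]
  | cons c ns ih => simp [List.foldr, ih, step_mkRow]

-- ===== VERDICT (by name: the statement is the Claim_ definition above) =====
theorem check_spec : Claim_equal_check := by
  intro new old _
  unfold Spec_check check check_alt
  simp only [fold_mkRow, head_mkRow]
  exact greedy_eq_sub _ _
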